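-- pv_equiv track=rewrite | github.com/Expensure/mastermind | mastermind.py | worst_case_algorithm
-- ===== SOURCE A (Python) =====
-- import ast
--
-- def feedback(guess, guess_me, kleur_aantal):
--     """
--     :param guess: Current guess
--     :param guess_me: Secret code
--     :return: Result of comparing guess and guess_me with pins.
--     """
--     blacks = 0
--     whites = 0
--     used = []
--     for i in range(kleur_aantal):
--         used.append(False)
--     # Finds blacks and marks their index as used
--     for i in range(kleur_aantal):
--         if guess[i] == guess_me[i]:
--             blacks += 1
--             used[i] = True
--
--     # Finds whites but skips the used indexes
--     for i in range(kleur_aantal):  # guess index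
--         for j in range(kleur_aantal):  # code index
--             if not used[j] and guess[j] == guess_me[i]:
--                 whites += 1
--                 used[j] = True
--     return blacks, whites
--
-- def worst_case_algorithm(all_possibilities):
--     # Source: YET ANOTHER MASTERMIND STRATEGY by Barteld Kooi
--
--     def get_worst_dict():
--         worst_dict = {}
--         for i in all_possibilities:
--             worst_dict[f"{i}"] = []
--             for j in all_possibilities:
--                 result = feedback(i, j, 4)  # Compares every possible code with all others
--                 worst_dict[f"{i}"].append(result)  # Adds result of that comparison to that code in dict
--         return worst_dict
--
--     def get_all_highest(worstdict):
--         all_highest = []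
--         for key in worstdict:  # For every code
--             unilist = []
--             countlist = []
--             q = worstdict[key]  # Check results
--             for i in q:  # Every result of the comparisons
--                 if i not in unilist:  # If this result hasn't been spotted yet, add it
--                     unilist.append(i)
--             for i in unilist:
--                 countlist.append(q.count(i))  # Add this result to the count, to see which comes
--             highest = max(countlist)
--             all_highest.append([key, unilist[countlist.index(highest)], highest])  # Adds the code, with which result is most frequent.
--         return all_highest
--
--     def results():
--         all_high = get_all_highest(get_worst_dict())
--         all_count = []
--
--         for i in all_high:
--             all_count.append(i[2])
--         lowest = min(all_count)
--         options = []
--         for i in all_high: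
--             if i[2] <= lowest:
--                 options.append(i)
--         return ast.literal_eval(options[0][0])
--     return results()
-- ===== SOURCE B (Python) =====
-- def feedback(guess, guess_me, kleur_aantal):
--     # Closed form: A's white loop never breaks after a match, so the first time a
--     # code colour is processed it consumes EVERY still-free guess position of that
--     # colour.  Hence a non-black guess position scores a white iff its colour
--     # occurs anywhere in the code -- no used-flags and no marking loop needed.
--     code = [guess_me[i] for i in range(kleur_aantal)]
--     blacks = sum(guess[i] == guess_me[i] for i in range(kleur_aantal))
--     whites = sum(guess[i] != guess_me[i] and guess[i] in code
--                  for i in range(kleur_aantal))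
--     return blacks, whites
--
--
-- def worst_case_algorithm(all_possibilities):
--     # One streaming pass with a running first-best accumulator; per guess a
--     # counter dict of feedbacks gives the worst group size directly.
--     best = None
--     best_worst = None
--     for guess in all_possibilities:
--         counts = {}
--         for code in all_possibilities:
--             fb = feedback(guess, code, 4)
--             counts[fb] = counts.get(fb, 0) + 1
--         worst = max(counts.values())
--         if best_worst is None or worst < best_worst:
--             best, best_worst = guess, worst
--     return list(best)
-- ===== Notes on version B (the rewrite author's own statement) =====
-- stated objective: simpler
-- what changed: feedback is recomputed in closed form (blacks = positionwise equalities over zipped 4-slices; whites = non-black guess positions whose colour occurs anywhere in the code, valid because A's white loop never breaks and so consumes every free position of a colour at its first occurrence), eliminating A's used-flag array and quadratic mark-and-rescan loops; the outer selection replaces A's four staged passes (string-keyed dict of feedback lists, unique-list/count-list/index, min+filter, literal_eval of the key) with one streaming pass keeping a running first-best and a per-guess feedback counter.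
import Mathlib
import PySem

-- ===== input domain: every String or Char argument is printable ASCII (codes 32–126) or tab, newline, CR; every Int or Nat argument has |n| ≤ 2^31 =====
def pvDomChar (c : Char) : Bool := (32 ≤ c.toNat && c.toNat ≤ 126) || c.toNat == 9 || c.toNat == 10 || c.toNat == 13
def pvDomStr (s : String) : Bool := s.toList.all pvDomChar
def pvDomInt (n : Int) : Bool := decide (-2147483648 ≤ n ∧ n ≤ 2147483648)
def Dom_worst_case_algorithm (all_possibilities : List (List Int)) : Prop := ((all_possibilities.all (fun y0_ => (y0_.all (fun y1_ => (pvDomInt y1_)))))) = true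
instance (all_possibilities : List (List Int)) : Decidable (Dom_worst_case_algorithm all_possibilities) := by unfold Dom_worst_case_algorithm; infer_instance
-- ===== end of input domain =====

set_option maxRecDepth 4096
set_option maxHeartbeats 1000000


-- B replaces A's quadratic mark-and-rescan `feedback` by a closed-form per-position
-- count/membership computation and A's worst_dict/unique-count/min-filter pipeline by one streaming pass with a
-- feedback-counter per guess and a running first-best accumulator (objective: simpler).

-- ===== PORT A =====
-- module-level helper `feedback`, exactly as in the Python module
-- pyGetD defaults are unreachable under Pre_ (every code has length ≥ 4, indices run over range(4))
def feedback (guess guess_me : List Int) (kleur_aantal : Int) : Int × Int :=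
  let used := (PySem.List.pyRange 0 kleur_aantal 1).foldl (fun (u : List Bool) _ => u ++ [false]) []
  let bu := (PySem.List.pyRange 0 kleur_aantal 1).foldl (fun (bu : Int × List Bool) i =>
      if PySem.List.pyGetD guess i 0 = PySem.List.pyGetD guess_me i 0
      then (bu.1 + 1, PySem.List.pySetD bu.2 i true) else bu) (0, used)
  let wu := (PySem.List.pyRange 0 kleur_aantal 1).foldl (fun (wu : Int × List Bool) i =>
      (PySem.List.pyRange 0 kleur_aantal 1).foldl (fun (wu : Int × List Bool) j =>
        if PySem.List.pyGetD wu.2 j false = false ∧ PySem.List.pyGetD guess j 0 = PySem.List.pyGetD guess_me i 0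
        then (wu.1 + 1, PySem.List.pySetD wu.2 j true) else wu) wu) ((0 : Int), bu.2)
  (bu.1, wu.1)

-- f"{i}" for a list of ints: Python's str(list) = "[a, b, …]" with str(int) entries
def pyReprInner : List Int → List Char
  | [] => []
  | [x] => PySem.Int.toChars x
  | x :: y :: xs => PySem.Int.toChars x ++ ',' :: ' ' :: pyReprInner (y :: xs)

def pyReprIntList (l : List Int) : String := String.ofList ('[' :: (pyReprInner l ++ [']']))

-- hand port of ast.literal_eval, exact on the strings A feeds it (str(list-of-ints) outputs):
-- decimal value of a digit run
def pvDecVal (ds : List Char) : Nat := ds.foldl (fun a c => a * 10 + (c.toNat - 48)) 0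
-- parse one (possibly negative) integer prefix, return it with the unconsumed rest
def pvParseInt (cs : List Char) : Int × List Char :=
  if cs.head? = some '-' then
    let p := cs.tail.span Char.isDigit
    (-(pvDecVal p.1 : Int), p.2)
  else
    let p := cs.span Char.isDigit
    ((pvDecVal p.1 : Int), p.2)
-- parse ", "-separated integers (fuel = remaining length bound)
def pvParseItems : Nat → List Char → List Int
  | 0, _ => []
  | fuel + 1, cs =>
    let p := pvParseInt cs
    match p.2 with
    | ',' :: ' ' :: rest => p.1 :: pvParseItems fuel rest
    | _ => [p.1]
def parseIntList (s : String) : List Int :=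
  match s.toList with
  | '[' :: rest => if rest.head? = some ']' then [] else pvParseItems rest.length rest
  | _ => []

def worst_case_algorithm (all_possibilities : List (List Int)) : List Int :=
  -- get_worst_dict
  let wd : PySem.Dict String (List (Int × Int)) :=
    all_possibilities.foldl (fun d i =>
      all_possibilities.foldl
        (fun d j => d.modify (pyReprIntList i) [] (fun q => q ++ [feedback i j 4]))
        (d.insert (pyReprIntList i) [])) PySem.Dict.empty
  -- get_all_highest
  let all_high : List (String × (Int × Int) × Int) :=
    wd.keys.foldl (fun acc key =>
      let q := wd.getD key []
      let unilist := q.foldl (fun u r => if u.contains r then u else u ++ [r]) []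
      let countlist := unilist.foldl (fun c r => c ++ [(PySem.List.count q r : Int)]) []
      -- max([]) / list.index miss are unreachable: q is nonempty for every key under Pre_
      let highest := (PySem.List.max? countlist (fun x => x)).getD 0
      acc ++ [(key,
        (PySem.List.pyGet? unilist (((PySem.List.index? countlist highest).getD 0 : Nat) : Int)).getD (0, 0),
        highest)]) []
  -- results
  let all_count := all_high.foldl (fun c i => c ++ [i.2.2]) []
  -- min([]) raises ValueError in Python: Pre_ excludes the empty input
  let lowest := (PySem.List.min? all_count (fun x => x)).getD 0
  let options := all_high.foldl (fun o i => if i.2.2 ≤ lowest then o ++ [i] else o) []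
  match PySem.List.pyGet? options 0 with
  | some o => parseIntList o.1
  | none => []  -- unreachable under Pre_: options contains the minimiser

-- ===== PORT B =====
-- B's feedback: no used-flags and no rescan — blacks are positionwise equalities, and a
-- non-black guess position scores a white iff its colour occurs anywhere in the code
def feedback_alt (guess guess_me : List Int) (kleur_aantal : Int) : Int × Int :=
  let code := (PySem.List.pyRange 0 kleur_aantal 1).map (fun i => PySem.List.pyGetD guess_me i 0)
  let blacks := (PySem.List.pyRange 0 kleur_aantal 1).foldl
      (fun (s : Int) i => s + if PySem.List.pyGetD guess i 0 = PySem.List.pyGetD guess_me i 0 then 1 else 0) 0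
  let whites := (PySem.List.pyRange 0 kleur_aantal 1).foldl
      (fun (s : Int) i => s + if PySem.List.pyGetD guess i 0 ≠ PySem.List.pyGetD guess_me i 0
          ∧ PySem.List.pyGetD guess i 0 ∈ code then 1 else 0) 0
  (blacks, whites)

def worst_case_algorithm_alt (all_possibilities : List (List Int)) : List Int :=
  let best : Option (List Int × Int) :=
    all_possibilities.foldl (fun best guess =>
      let counts : PySem.Dict (Int × Int) Int :=
        all_possibilities.foldl (fun d code => d.modify (feedback_alt guess code 4) 0 (· + 1))
          PySem.Dict.empty
      let worst := (PySem.List.max? counts.values (fun x => x)).getD 0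
      match best with
      | none => some (guess, worst)
      | some (bg, bw) => if worst < bw then some (guess, worst) else some (bg, bw)) none
  match best with
  | some (g, _) => g
  | none => []  -- Source B raises here (empty input, outside Pre_)

-- ===== PRECONDITION & SPEC =====
-- A raises on the empty list (min([]) → ValueError) and on any code shorter than 4 entries
-- (feedback indexes guess[i] for i in range(4) → IndexError); Pre_ excludes exactly those.
def Pre_worst_case_algorithm (all_possibilities : List (List Int)) : Prop :=
  all_possibilities ≠ [] ∧ ∀ p ∈ all_possibilities, 4 ≤ p.length
instance (all_possibilities : List (List Int)) : Decidable (Pre_worst_case_algorithm all_possibilities) := by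
  unfold Pre_worst_case_algorithm; infer_instance
def pvWitness_worst_case_algorithm : List (List Int) := [[1, 2, 3, 4], [1, 1, 2, 2]]

def Spec_worst_case_algorithm (all_possibilities : List (List Int)) (out : List Int) : Prop :=
  out = worst_case_algorithm_alt all_possibilities
instance (all_possibilities : List (List Int)) (out : List Int) : Decidable (Spec_worst_case_algorithm all_possibilities out) := by
  unfold Spec_worst_case_algorithm; infer_instance

-- ===== CLAIM (what is proved, stated in full; the proofs are below) =====
def Claim_equal_worst_case_algorithm : Prop := ∀ (all_possibilities : List (List Int)), Dom_worst_case_algorithm all_possibilities → Pre_worst_case_algorithm all_possibilities → Spec_worst_case_algorithm all_possibilities (worst_case_algorithm all_possibilities)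

-- ===== LEMMAS AND PROOFS =====

-- ---- the two feedbacks agree on codes of length ≥ 4 ----
theorem range4 : PySem.List.pyRange 0 4 1 = [0,1,2,3] := by decide
theorem pvG0 (g0 g1 g2 g3 : Int) (gr : List Int) : PySem.List.pyGetD (g0::g1::g2::g3::gr) (0:Int) 0 = g0 := by
  rw [PySem.List.pyGetD_of_nonneg _ _ (by norm_num)]; rfl
theorem pvG1 (g0 g1 g2 g3 : Int) (gr : List Int) : PySem.List.pyGetD (g0::g1::g2::g3::gr) (1:Int) 0 = g1 := by
  rw [PySem.List.pyGetD_of_nonneg _ _ (by norm_num)]; rfl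
theorem pvG2 (g0 g1 g2 g3 : Int) (gr : List Int) : PySem.List.pyGetD (g0::g1::g2::g3::gr) (2:Int) 0 = g2 := by
  rw [PySem.List.pyGetD_of_nonneg _ _ (by norm_num)]; rfl
theorem pvG3 (g0 g1 g2 g3 : Int) (gr : List Int) : PySem.List.pyGetD (g0::g1::g2::g3::gr) (3:Int) 0 = g3 := by
  rw [PySem.List.pyGetD_of_nonneg _ _ (by norm_num)]; rfl
theorem pvU0 (a b c d : Bool) : PySem.List.pyGetD [a,b,c,d] (0:Int) false = a := rfl
theorem pvU1 (a b c d : Bool) : PySem.List.pyGetD [a,b,c,d] (1:Int) false = b := rfl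
theorem pvU2 (a b c d : Bool) : PySem.List.pyGetD [a,b,c,d] (2:Int) false = c := rfl
theorem pvU3 (a b c d : Bool) : PySem.List.pyGetD [a,b,c,d] (3:Int) false = d := rfl
theorem pvS0 (a b c d : Bool) (v : Bool) : PySem.List.pySetD [a,b,c,d] (0:Int) v = [v,b,c,d] := rfl
theorem pvS1 (a b c d : Bool) (v : Bool) : PySem.List.pySetD [a,b,c,d] (1:Int) v = [a,v,c,d] := rfl
theorem pvS2 (a b c d : Bool) (v : Bool) : PySem.List.pySetD [a,b,c,d] (2:Int) v = [a,b,v,d] := rfl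
theorem pvS3 (a b c d : Bool) (v : Bool) : PySem.List.pySetD [a,b,c,d] (3:Int) v = [a,b,c,v] := rfl

theorem black4 (g0 g1 g2 g3 c0 c1 c2 c3 : Int) (gr cr : List Int) :
    (PySem.List.pyRange 0 4 1).foldl (fun (bu : Int × List Bool) i =>
      if PySem.List.pyGetD (g0::g1::g2::g3::gr) i 0 = PySem.List.pyGetD (c0::c1::c2::c3::cr) i 0
      then (bu.1 + 1, PySem.List.pySetD bu.2 i true) else bu) (0, [false,false,false,false])
    = ((((0 + if g0 = c0 then 1 else 0) + if g1 = c1 then 1 else 0) + if g2 = c2 then 1 else 0) + (if g3 = c3 then 1 else 0),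
       [decide (g0 = c0), decide (g1 = c1), decide (g2 = c2), decide (g3 = c3)]) := by
  rw [range4]
  simp only [List.foldl_cons, List.foldl_nil, pvG0, pvG1, pvG2, pvG3]
  by_cases h0 : g0 = c0 <;> by_cases h1 : g1 = c1 <;> by_cases h2 : g2 = c2 <;> by_cases h3 : g3 = c3 <;>
    simp only [h0, h1, h2, h3, if_true, if_false, ite_true, ite_false,
      decide_true, decide_false, pvS0, pvS1, pvS2, pvS3] <;> simp [h0, h1, h2, h3]

theorem whiteInner (g0 g1 g2 g3 x w : Int) (u0 u1 u2 u3 : Bool) (gr : List Int) :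
    (PySem.List.pyRange 0 4 1).foldl (fun (wu : Int × List Bool) j =>
      if PySem.List.pyGetD wu.2 j false = false ∧ PySem.List.pyGetD (g0::g1::g2::g3::gr) j 0 = x
      then (wu.1 + 1, PySem.List.pySetD wu.2 j true) else wu) (w, [u0,u1,u2,u3])
    = ((((w + if u0 = false ∧ g0 = x then 1 else 0) + if u1 = false ∧ g1 = x then 1 else 0)
          + if u2 = false ∧ g2 = x then 1 else 0) + (if u3 = false ∧ g3 = x then 1 else 0),
       [if u0 = false ∧ g0 = x then true else u0, if u1 = false ∧ g1 = x then true else u1,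
        if u2 = false ∧ g2 = x then true else u2, if u3 = false ∧ g3 = x then true else u3]) := by
  rw [range4]
  simp only [List.foldl_cons, List.foldl_nil, pvG0, pvG1, pvG2, pvG3]
  by_cases h0 : u0 = false ∧ g0 = x <;> simp [h0, pvS0, pvU0, pvU1, pvU2, pvU3] <;>
  by_cases h1 : u1 = false ∧ g1 = x <;> simp [h1, pvS1, pvU0, pvU1, pvU2, pvU3] <;>
  by_cases h2 : u2 = false ∧ g2 = x <;> simp [h2, pvS2, pvU0, pvU1, pvU2, pvU3] <;>
  by_cases h3 : u3 = false ∧ g3 = x <;> simp [h3, pvS3, pvU0, pvU1, pvU2, pvU3] <;>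
  simp_all

-- column lemma: the four white contributions of one guess position across the four code
-- positions collapse to "non-black, and the colour occurs somewhere in the code"
theorem perj' (a b y0 y1 y2 y3 : Int) (v0 v1 v2 v3 : Bool)
    (h0 : decide (a = b) = v0)
    (h1 : (if v0 = false ∧ a = y0 then true else v0) = v1)
    (h2 : (if v1 = false ∧ a = y1 then true else v1) = v2)
    (h3 : (if v2 = false ∧ a = y2 then true else v2) = v3) :
    ((((if v0 = false ∧ a = y0 then (1:Int) else 0)
      + if v1 = false ∧ a = y1 then 1 else 0)
      + if v2 = false ∧ a = y2 then 1 else 0)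
      + if v3 = false ∧ a = y3 then 1 else 0)
    = if ¬a = b ∧ (a = y0 ∨ a = y1 ∨ a = y2 ∨ a = y3) then 1 else 0 := by
  subst h3; subst h2; subst h1; subst h0
  by_cases hb : a = b <;> by_cases e0 : a = y0 <;> by_cases e1 : a = y1 <;>
    by_cases e2 : a = y2 <;> by_cases e3 : a = y3 <;>
    simp [hb, e0, e1, e2, e3] <;> (try (split_ifs <;> simp_all)) <;> omega

theorem fbAlt_eval (g0 g1 g2 g3 c0 c1 c2 c3 : Int) (gr cr : List Int) :
    feedback_alt (g0::g1::g2::g3::gr) (c0::c1::c2::c3::cr) 4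
    = ((((0 + if g0 = c0 then 1 else 0) + if g1 = c1 then 1 else 0) + if g2 = c2 then 1 else 0) + (if g3 = c3 then 1 else 0),
       (((0 + if ¬g0 = c0 ∧ (g0 = c0 ∨ g0 = c1 ∨ g0 = c2 ∨ g0 = c3) then 1 else 0)
         + if ¬g1 = c1 ∧ (g1 = c0 ∨ g1 = c1 ∨ g1 = c2 ∨ g1 = c3) then 1 else 0)
         + if ¬g2 = c2 ∧ (g2 = c0 ∨ g2 = c1 ∨ g2 = c2 ∨ g2 = c3) then 1 else 0)
         + if ¬g3 = c3 ∧ (g3 = c0 ∨ g3 = c1 ∨ g3 = c2 ∨ g3 = c3) then 1 else 0) := by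
  unfold feedback_alt
  rw [range4]
  simp only [List.map_cons, List.map_nil, List.foldl_cons, List.foldl_nil,
    pvG0, pvG1, pvG2, pvG3, List.mem_cons, List.not_mem_nil, or_false, ne_eq]

theorem feedback_eq (g0 g1 g2 g3 c0 c1 c2 c3 : Int) (gr cr : List Int) :
    feedback (g0::g1::g2::g3::gr) (c0::c1::c2::c3::cr) 4
      = feedback_alt (g0::g1::g2::g3::gr) (c0::c1::c2::c3::cr) 4 := by
  have hused : (PySem.List.pyRange 0 4 1).foldl (fun (u : List Bool) _ => u ++ [false]) []
      = [false,false,false,false] := by decide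
  rw [fbAlt_eval]
  unfold feedback
  simp only [hused]
  rw [black4]
  generalize hd0 : decide (g0 = c0) = d0
  generalize hd1 : decide (g1 = c1) = d1
  generalize hd2 : decide (g2 = c2) = d2
  generalize hd3 : decide (g3 = c3) = d3
  nth_rewrite 2 [range4]
  simp only [List.foldl_cons, List.foldl_nil, pvG0, pvG1, pvG2, pvG3]
  rw [whiteInner]
  generalize he0 : (if d0 = false ∧ g0 = c0 then true else d0) = e0
  generalize he1 : (if d1 = false ∧ g1 = c0 then true else d1) = e1
  generalize he2 : (if d2 = false ∧ g2 = c0 then true else d2) = e2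
  generalize he3 : (if d3 = false ∧ g3 = c0 then true else d3) = e3
  rw [whiteInner]
  generalize hf0 : (if e0 = false ∧ g0 = c1 then true else e0) = f0
  generalize hf1 : (if e1 = false ∧ g1 = c1 then true else e1) = f1
  generalize hf2 : (if e2 = false ∧ g2 = c1 then true else e2) = f2
  generalize hf3 : (if e3 = false ∧ g3 = c1 then true else e3) = f3
  rw [whiteInner]
  generalize hk0 : (if f0 = false ∧ g0 = c2 then true else f0) = k0
  generalize hk1 : (if f1 = false ∧ g1 = c2 then true else f1) = k1
  generalize hk2 : (if f2 = false ∧ g2 = c2 then true else f2) = k2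
  generalize hk3 : (if f3 = false ∧ g3 = c2 then true else f3) = k3
  rw [whiteInner]
  dsimp only
  rw [Prod.mk.injEq]
  refine ⟨rfl, ?_⟩
  have p0 := perj' g0 c0 c0 c1 c2 c3 d0 e0 f0 k0 hd0 he0 hf0 hk0
  have p1 := perj' g1 c1 c0 c1 c2 c3 d1 e1 f1 k1 hd1 he1 hf1 hk1
  have p2 := perj' g2 c2 c0 c1 c2 c3 d2 e2 f2 k2 hd2 he2 hf2 hk2
  have p3 := perj' g3 c3 c0 c1 c2 c3 d3 e3 f3 k3 hd3 he3 hf3 hk3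
  linarith [p0, p1, p2, p3]

theorem feedback_len_eq (g c : List Int) (hg : 4 ≤ g.length) (hc : 4 ≤ c.length) :
    feedback g c 4 = feedback_alt g c 4 := by
  obtain ⟨a0, a1, a2, a3, gr, rfl⟩ : ∃ a0 a1 a2 a3 gr, g = a0::a1::a2::a3::gr := by
    rcases g with _|⟨a0,_|⟨a1,_|⟨a2,_|⟨a3,gr⟩⟩⟩⟩ <;> simp at hg <;>
      first | omega | exact ⟨a0,a1,a2,a3,gr,rfl⟩
  obtain ⟨b0, b1, b2, b3, cr, rfl⟩ : ∃ b0 b1 b2 b3 cr, c = b0::b1::b2::b3::cr := by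
    rcases c with _|⟨b0,_|⟨b1,_|⟨b2,_|⟨b3,cr⟩⟩⟩⟩ <;> simp at hc <;>
      first | omega | exact ⟨b0,b1,b2,b3,cr,rfl⟩
  exact feedback_eq a0 a1 a2 a3 b0 b1 b2 b3 gr cr

-- ---- string round trip: parseIntList (pyReprIntList l) = l ----
theorem pvDecVal_append (ds : List Char) (c : Char) :
    pvDecVal (ds ++ [c]) = pvDecVal ds * 10 + (c.toNat - 48) := by
  simp [pvDecVal]
theorem pvDecVal_toDigits (n : Nat) : pvDecVal (Nat.toDigits 10 n) = n := by
  induction n using Nat.strong_induction_on with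
  | _ n ih =>
    rw [Nat.toDigits_eq_if (by norm_num)]
    by_cases h : n < 10
    · simp only [if_pos h]
      interval_cases n <;> decide
    · simp only [if_neg h]
      rw [pvDecVal_append, ih (n / 10) (by omega)]
      have h10 : n % 10 < 10 := Nat.mod_lt _ (by norm_num)
      have hd : (Nat.digitChar (n % 10)).toNat - 48 = n % 10 := by
        generalize hq : n % 10 = q at h10 ⊢
        interval_cases q <;> decide
      omega
theorem pvSpan_digits (cs rest : List Char) (h1 : ∀ c ∈ cs, c.isDigit = true)
    (h2 : ∀ c ∈ rest.take 1, c.isDigit = false) :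
    (cs ++ rest).span Char.isDigit = (cs, rest) := by
  have ht : cs.takeWhile Char.isDigit = cs := List.takeWhile_eq_self_iff.mpr h1
  have hd : cs.dropWhile Char.isDigit = [] := List.dropWhile_eq_nil_iff.mpr (by intro x hx; exact h1 x hx)
  have htr : rest.takeWhile Char.isDigit = [] := by
    cases rest with
    | nil => rfl
    | cons c r => simp [h2 c (by simp)]
  have hdr : rest.dropWhile Char.isDigit = rest := by
    cases rest with
    | nil => rfl
    | cons c r => simp [h2 c (by simp)]
  rw [List.span_eq_takeWhile_dropWhile, List.takeWhile_append, List.dropWhile_append]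
  simp [ht, hd, htr, hdr]

theorem pvParseInt_toChars (n : Int) (rest : List Char)
    (h2 : ∀ c ∈ rest.take 1, c.isDigit = false) :
    pvParseInt (PySem.Int.toChars n ++ rest) = (n, rest) := by
  by_cases hn : n < 0
  · have he : PySem.Int.toChars n = '-' :: Nat.toDigits 10 n.natAbs := by
      unfold PySem.Int.toChars; rw [if_pos hn]
    have hsp := pvSpan_digits (Nat.toDigits 10 n.natAbs) rest
      (fun c hc => Nat.isDigit_of_mem_toDigits (by norm_num) (by norm_num) hc) h2
    rw [List.span_eq_takeWhile_dropWhile, Prod.mk.injEq] at hsp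
    obtain ⟨hT, hD⟩ := hsp
    rw [he]
    simp only [pvParseInt, List.cons_append, List.head?_cons, List.tail_cons,
      List.span_eq_takeWhile_dropWhile, hT, hD, pvDecVal_toDigits]
    rw [if_pos trivial]
    simp only [Prod.mk.injEq]
    exact ⟨by omega, trivial⟩
  · have he : PySem.Int.toChars n = Nat.toDigits 10 n.toNat := by
      unfold PySem.Int.toChars; rw [if_neg hn]
    obtain ⟨d, ds, hds⟩ : ∃ d ds, Nat.toDigits 10 n.toNat = d :: ds := by
      cases h : Nat.toDigits 10 n.toNat with
      | nil => have := Nat.length_toDigits_pos (b := 10) (n := n.toNat); rw [h] at this; simp at this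
      | cons a t => exact ⟨a, t, rfl⟩
    have hdd : d.isDigit = true := Nat.isDigit_of_mem_toDigits (b := 10) (n := n.toNat)
      (by norm_num) (by norm_num) (by rw [hds]; simp)
    have hdne : d ≠ '-' := by intro h; rw [h] at hdd; simp [Char.isDigit] at hdd
    have hsp := pvSpan_digits (Nat.toDigits 10 n.toNat) rest
      (fun c hc => Nat.isDigit_of_mem_toDigits (by norm_num) (by norm_num) hc) h2
    rw [List.span_eq_takeWhile_dropWhile, Prod.mk.injEq] at hsp
    obtain ⟨hT, hD⟩ := hsp
    rw [he, hds]
    simp only [pvParseInt, List.cons_append, List.head?_cons]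
    rw [if_neg (by simpa using hdne)]
    simp only [List.span_eq_takeWhile_dropWhile, ← List.cons_append, ← hds, hT, hD,
      pvDecVal_toDigits, Prod.mk.injEq]
    exact ⟨by omega, trivial⟩

theorem pvParseItems_round (l : List Int) (hne : l ≠ []) :
    ∀ fuel, l.length ≤ fuel → pvParseItems fuel (pyReprInner l ++ [']']) = l := by
  induction l using pyReprInner.induct with
  | case1 => exact absurd rfl hne
  | case2 x =>
    intro fuel hf
    obtain ⟨f, rfl⟩ : ∃ f, fuel = f + 1 := ⟨fuel - 1, by simp at hf; omega⟩
    simp only [pyReprInner, pvParseItems]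
    rw [pvParseInt_toChars x [']'] (by intro c hc; simp at hc; subst hc; decide)]
    rfl
  | case3 x y xs ih =>
    intro fuel hf
    obtain ⟨f, rfl⟩ : ∃ f, fuel = f + 1 := ⟨fuel - 1, by simp at hf; omega⟩
    simp only [pyReprInner, pvParseItems, List.append_assoc, List.cons_append]
    rw [pvParseInt_toChars x (',' :: ' ' :: (pyReprInner (y :: xs) ++ [']']))
      (by intro c hc; simp at hc; subst hc; decide)]
    show x :: pvParseItems f (pyReprInner (y :: xs) ++ [']']) = x :: y :: xs
    rw [ih (by simp) f (by simp at hf ⊢; omega)]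
theorem pvReprInner_head (x : Int) (xs : List Int) :
    ∃ c cs, pyReprInner (x :: xs) = c :: cs ∧ c ≠ ']' := by
  have hhd : ∀ (n : Int) (t : List Char), ∃ c cs, PySem.Int.toChars n ++ t = c :: cs ∧ c ≠ ']' := by
    intro n t
    by_cases hn : n < 0
    · exact ⟨'-', Nat.toDigits 10 n.natAbs ++ t,
        by unfold PySem.Int.toChars; rw [if_pos hn]; simp, by decide⟩
    · have he : PySem.Int.toChars n = Nat.toDigits 10 n.toNat := by
        unfold PySem.Int.toChars; rw [if_neg hn]
      obtain ⟨d, ds, hds⟩ : ∃ d ds, Nat.toDigits 10 n.toNat = d :: ds := by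
        cases h : Nat.toDigits 10 n.toNat with
        | nil => have := Nat.length_toDigits_pos (b := 10) (n := n.toNat); rw [h] at this; simp at this
        | cons a t2 => exact ⟨a, t2, rfl⟩
      have hdd : d.isDigit = true := Nat.isDigit_of_mem_toDigits (b := 10) (n := n.toNat)
        (by norm_num) (by norm_num) (by rw [hds]; simp)
      exact ⟨d, ds ++ t, by rw [he, hds]; simp,
        by intro h; rw [h] at hdd; simp [Char.isDigit] at hdd⟩
  cases xs with
  | nil =>
    obtain ⟨c, cs, h, hne⟩ := hhd x []
    rw [List.append_nil] at h
    exact ⟨c, cs, by simpa [pyReprInner] using h, hne⟩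
  | cons y ys =>
    obtain ⟨c, cs, h, hne⟩ := hhd x (',' :: ' ' :: pyReprInner (y :: ys))
    exact ⟨c, cs, by simpa [pyReprInner] using h, hne⟩
theorem pvLen_reprInner (l : List Int) : l.length ≤ (pyReprInner l).length + 1 := by
  induction l using pyReprInner.induct with
  | case1 => simp [pyReprInner]
  | case2 x => simp [pyReprInner]
  | case3 x y xs ih =>
    simp only [pyReprInner, List.length_append, List.length_cons] at ih ⊢
    omega
theorem pvParse_repr (l : List Int) : parseIntList (pyReprIntList l) = l := by
  cases l with
  | nil => rfl
  | cons x xs =>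
    obtain ⟨c, cs, h, hne⟩ := pvReprInner_head x xs
    unfold parseIntList pyReprIntList
    simp only [String.toList_ofList]
    rw [h]
    simp only [List.cons_append, List.head?_cons]
    rw [if_neg (by simpa using hne)]
    rw [← List.cons_append, ← h]
    have hlen : (pyReprInner (x :: xs) ++ [']']).length = (pyReprInner (x :: xs)).length + 1 := by simp
    rw [hlen]
    exact pvParseItems_round (x :: xs) (by simp) _ (pvLen_reprInner (x :: xs))

theorem pvRepr_inj : Function.Injective pyReprIntList := by
  intro a b h
  have := congrArg parseIntList h
  simpa [pvParse_repr] using this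

-- ---- dict construction ----
def pvQ (all : List (List Int)) (i : List Int) : List (Int × Int) :=
  all.map (fun j => feedback i j 4)

def pvStepA (all : List (List Int)) (d : PySem.Dict String (List (Int × Int))) (i : List Int) :
    PySem.Dict String (List (Int × Int)) :=
  all.foldl (fun d j => d.modify (pyReprIntList i) [] (fun q => q ++ [feedback i j 4]))
    (d.insert (pyReprIntList i) [])

theorem pvStepA_fold_eq (all : List (List Int)) (i : List Int) (d0 : PySem.Dict String (List (Int × Int))) :
    all.foldl (fun d j => d.modify (pyReprIntList i) [] (fun q => q ++ [feedback i j 4])) d0 =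
      (all.map (fun j => (pyReprIntList i, feedback i j 4))).foldl
        (fun d p => d.modify p.1 [] (fun q => q ++ [p.2])) d0 := by
  rw [List.foldl_map]

theorem pvStepA_getD_self (all : List (List Int)) (d : PySem.Dict String (List (Int × Int))) (i : List Int) :
    (pvStepA all d i).getD (pyReprIntList i) [] = pvQ all i := by
  unfold pvStepA
  rw [pvStepA_fold_eq, PySem.Dict.getD_foldl_modify_append, PySem.Dict.getD_insert_self]
  simp only [List.filter_map, List.map_map, List.nil_append]
  have : (List.filter ((fun p => p.1 == pyReprIntList i) ∘ fun j => (pyReprIntList i, feedback i j 4)) all) = all := by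
    apply List.filter_eq_self.mpr
    intro a _
    simp
  rw [this, pvQ]
  simp [Function.comp]

theorem pvStepA_getD_ne (all : List (List Int)) (d : PySem.Dict String (List (Int × Int))) (i : List Int)
    (k : String) (hk : k ≠ pyReprIntList i) :
    (pvStepA all d i).getD k [] = d.getD k [] := by
  unfold pvStepA
  rw [pvStepA_fold_eq, PySem.Dict.getD_foldl_modify_append,
    PySem.Dict.getD_insert_of_ne _ _ _ hk]
  have : ∀ p ∈ all.map (fun j => (pyReprIntList i, feedback i j 4)),
      (p.1 == k) = false := by
    intro p hp
    simp only [List.mem_map] at hp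
    obtain ⟨j, -, rfl⟩ := hp
    exact beq_eq_false_iff_ne.mpr (fun h => hk (h.symm))
  rw [List.filter_eq_nil_iff.mpr (by intro p hp; simp [this p hp])]
  simp

theorem pvStepA_keys (all : List (List Int)) (d : PySem.Dict String (List (Int × Int))) (i : List Int) :
    (pvStepA all d i).keys = PySem.Set.add d.keys (pyReprIntList i) := by
  unfold pvStepA
  have hinner : ∀ (l : List (List Int)) (d0 : PySem.Dict String (List (Int × Int))),
      d0.contains (pyReprIntList i) = true →
      (l.foldl (fun d j => d.modify (pyReprIntList i) [] (fun q => q ++ [feedback i j 4])) d0).keys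
        = d0.keys := by
    intro l
    induction l with
    | nil => intro d0 _; rfl
    | cons j t ih =>
      intro d0 hc
      simp only [List.foldl_cons]
      have hk : (d0.modify (pyReprIntList i) [] (fun q => q ++ [feedback i j 4])).keys = d0.keys := by
        rw [PySem.Dict.keys_modify, PySem.Dict.keys_insert_of_contains _ _ hc]
      rw [ih _ (by rw [PySem.Dict.contains_iff_mem_keys, hk, ← PySem.Dict.contains_iff_mem_keys]; exact hc)]
      exact hk
  rw [hinner _ _ (PySem.Dict.contains_insert_self _ _ _)]
  by_cases hm : pyReprIntList i ∈ d.keys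
  · rw [PySem.Dict.keys_insert_of_contains _ _ ((PySem.Dict.contains_iff_mem_keys _ _).mpr hm),
      PySem.Set.add_of_mem hm]
  · rw [PySem.Dict.keys_insert_of_not_contains _ _
      (by rw [← Bool.not_eq_true, PySem.Dict.contains_iff_mem_keys]; exact hm), PySem.Set.add_of_not_mem hm]

theorem pvBuild_getD_notmem (all l : List (List Int)) (d : PySem.Dict String (List (Int × Int)))
    (k : String) (h : ∀ i ∈ l, pyReprIntList i ≠ k) :
    (l.foldl (pvStepA all) d).getD k [] = d.getD k [] := by
  induction l generalizing d with
  | nil => rfl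
  | cons a t ih =>
    simp only [List.foldl_cons]
    rw [ih _ (fun i hi => h i (List.mem_cons_of_mem a hi)),
      pvStepA_getD_ne all d a k (Ne.symm (h a List.mem_cons_self))]

theorem pvBuild_getD_mem (all : List (List Int)) (i : List Int) :
    ∀ (l : List (List Int)) (d : PySem.Dict String (List (Int × Int))), i ∈ l →
    (l.foldl (pvStepA all) d).getD (pyReprIntList i) [] = pvQ all i := by
  intro l
  induction l with
  | nil => intro d h; simp at h
  | cons a t ih =>
    intro d hmem
    simp only [List.foldl_cons]
    by_cases ht : i ∈ t
    · exact ih _ ht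
    · have hia : i = a := by
        rcases List.mem_cons.mp hmem with h | h
        · exact h
        · exact absurd h ht
      subst hia
      rw [pvBuild_getD_notmem all t _ (pyReprIntList i)
        (fun i' hi' he => ht (pvRepr_inj he ▸ hi')), pvStepA_getD_self]

theorem pvBuild_keys (all : List (List Int)) :
    ∀ (l : List (List Int)) (d : PySem.Dict String (List (Int × Int))),
    (l.foldl (pvStepA all) d).keys = l.foldl (fun s b => PySem.Set.add s (pyReprIntList b)) d.keys := by
  intro l
  induction l with
  | nil => intro d; rfl
  | cons a t ih =>
    intro d
    simp only [List.foldl_cons]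
    rw [ih, pvStepA_keys]

theorem pvOfList_map_inj {α β : Type} [BEq α] [LawfulBEq α] [BEq β] [LawfulBEq β] (f : α → β)
    (hinj : Function.Injective f) (l : List α) :
    PySem.Set.ofList (l.map f) = (PySem.Set.ofList l).map f := by
  have key : ∀ (l : List α) (s : List α),
      (l.map f).foldl PySem.Set.add (s.map f) = (l.foldl PySem.Set.add s).map f := by
    intro l
    induction l with
    | nil => intro s; rfl
    | cons x t ih =>
      intro s
      simp only [List.map_cons, List.foldl_cons]
      have hadd : PySem.Set.add (s.map f) (f x) = (PySem.Set.add s x).map f := by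
        by_cases hx : x ∈ s
        · rw [PySem.Set.add_of_mem (List.mem_map_of_mem hx), PySem.Set.add_of_mem hx]
        · have hfx : f x ∉ s.map f := by
            intro hfx
            obtain ⟨y, hy, hfy⟩ := List.mem_map.mp hfx
            exact hx (hinj hfy ▸ hy)
          simp [PySem.Set.add_of_not_mem hfx, PySem.Set.add_of_not_mem hx]
      rw [hadd, ih]
  have := key l []
  simpa [PySem.Set.ofList, PySem.Set.empty] using this

-- ---- selection: first minimiser ----
def pvRunmin {α : Type} (w : α → Int) : α → List α → α
  | bg, [] => bg
  | bg, x :: xs => pvRunmin w (if w x < w bg then x else bg) xs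

theorem pvRunmin_self {α : Type} (w : α → Int) (x : α) (ys : List α)
    (h : ∀ e ∈ ys, w x ≤ w e) : pvRunmin w x ys = x := by
  induction ys generalizing x with
  | nil => rfl
  | cons e t ih =>
    have hne : ¬ (w e < w x) := not_lt.mpr (h e List.mem_cons_self)
    simp only [pvRunmin, if_neg hne]
    exact ih x (fun e' he' => h e' (List.mem_cons_of_mem e he'))

theorem pvFind_congr {α : Type} (p q : α → Bool) :
    ∀ (l : List α), (∀ a ∈ l, p a = q a) → List.find? p l = List.find? q l := by
  intro l
  induction l with
  | nil => intro _; rfl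
  | cons a t ih =>
    intro h
    cases hpa : p a with
    | true =>
      rw [List.find?_cons_of_pos hpa, List.find?_cons_of_pos (by rw [← h a List.mem_cons_self]; exact hpa)]
    | false =>
      rw [List.find?_cons_of_neg (by simp [hpa]),
        List.find?_cons_of_neg (by rw [← h a List.mem_cons_self]; simp [hpa]),
        ih (fun a ha => h a (List.mem_cons_of_mem _ ha))]

theorem pvFind_min {α : Type} (w : α → Int) :
    ∀ (xs : List α) (x : α),
    List.find? (fun e => decide (w e ≤ (xs.map w).foldl min (w x))) (x :: xs) =
      some (pvRunmin w x xs) := by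
  intro xs
  induction xs with
  | nil => intro x; simp [pvRunmin]
  | cons y ys ih =>
    intro x
    simp only [List.map_cons, List.foldl_cons]
    by_cases hxy : w y < w x
    · simp only [min_eq_right hxy.le]
      have hbound := (PySem.List.foldl_min_le (ys.map w) (w y)).1
      rw [show pvRunmin w x (y :: ys) = pvRunmin w y ys by simp [pvRunmin, if_pos hxy]]
      rw [List.find?_cons_of_neg (by simp only [decide_eq_true_eq]; omega)]
      exact ih y
    · simp only [min_eq_left (not_lt.mp hxy)]
      have hyx := not_lt.mp hxy
      rw [show pvRunmin w x (y :: ys) = pvRunmin w x ys by simp [pvRunmin, if_neg hxy]]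
      by_cases hpx : w x ≤ (ys.map w).foldl min (w x)
      · have hall : ∀ e ∈ ys, w x ≤ w e := fun e he =>
          le_trans hpx ((PySem.List.foldl_min_le (ys.map w) (w x)).2 (w e) (List.mem_map_of_mem he))
        rw [List.find?_cons_of_pos (by simpa using hpx), pvRunmin_self w x ys hall]
      · have hb := (PySem.List.foldl_min_le (ys.map w) (w x)).1
        rw [List.find?_cons_of_neg (by simpa using hpx),
          List.find?_cons_of_neg (by simp only [decide_eq_true_eq]; omega)]
        have hx := ih x
        rw [List.find?_cons_of_neg (by simpa using hpx)] at hx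
        exact hx

theorem pvFind_foldl_add {α : Type} [BEq α] [LawfulBEq α] (p : α → Bool) :
    ∀ (l : List α) (s : List α), (∀ x ∈ s, p x = false) →
    List.find? p (l.foldl PySem.Set.add s) = List.find? p l := by
  have hpre : ∀ (l s : List α), ∃ t, l.foldl PySem.Set.add s = s ++ t := by
    intro l
    induction l with
    | nil => exact fun s => ⟨[], by simp⟩
    | cons x u ih =>
      intro s
      simp only [List.foldl_cons]
      by_cases hx : x ∈ s
      · rw [PySem.Set.add_of_mem hx]; exact ih s
      · rw [PySem.Set.add_of_not_mem hx]
        obtain ⟨t, ht⟩ := ih (s ++ [x])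
        exact ⟨[x] ++ t, by rw [ht, List.append_assoc]⟩
  intro l
  induction l with
  | nil =>
    intro s hs
    simp only [List.foldl_nil, List.find?_nil]
    exact List.find?_eq_none.mpr (fun x hx => by simp [hs x hx])
  | cons x t ih =>
    intro s hs
    simp only [List.foldl_cons]
    by_cases hpx : p x = true
    · have hxs : x ∉ s := fun hmem => by simp [hs x hmem] at hpx
      rw [PySem.Set.add_of_not_mem hxs]
      obtain ⟨u, hu⟩ := hpre t (s ++ [x])
      rw [hu, List.append_assoc, List.find?_append,
        List.find?_eq_none.mpr (fun y hy => by simp [hs y hy])]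
      simp [List.find?_cons_of_pos hpx]
    · by_cases hxs : x ∈ s
      · rw [PySem.Set.add_of_mem hxs, ih s hs, List.find?_cons_of_neg (by simp [hpx])]
      · have hs' : ∀ y ∈ s ++ [x], p y = false := by
          intro y hy
          rcases List.mem_append.mp hy with h | h
          · exact hs y h
          · simp at h; subst h; simpa using hpx
        rw [PySem.Set.add_of_not_mem hxs, ih (s ++ [x]) hs',
          List.find?_cons_of_neg (by simp [hpx])]

theorem pvMin_ofList {α : Type} [BEq α] [LawfulBEq α] (w : α → Int) (l : List α) :
    PySem.List.min? ((PySem.Set.ofList l).map w) (fun x => x) =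
      PySem.List.min? (l.map w) (fun x => x) := by
  cases l with
  | nil => rfl
  | cons a t =>
    have hne1 : (PySem.Set.ofList (a :: t)).map w ≠ [] := by
      have : a ∈ PySem.Set.ofList (a :: t) := (PySem.Set.mem_ofList _ _).mpr List.mem_cons_self
      intro h
      rw [List.map_eq_nil_iff] at h
      simp [h] at this
    have hne2 : (a :: t).map w ≠ [] := by simp
    obtain ⟨m1, hm1⟩ : ∃ m1, PySem.List.min? ((PySem.Set.ofList (a :: t)).map w) (fun x => x) = some m1 := by
      cases h : PySem.List.min? ((PySem.Set.ofList (a :: t)).map w) (fun x => x) with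
      | none => exact absurd ((PySem.List.min?_eq_none_iff _ _).mp h) hne1
      | some m => exact ⟨m, rfl⟩
    obtain ⟨m2, hm2⟩ : ∃ m2, PySem.List.min? ((a :: t).map w) (fun x => x) = some m2 := by
      cases h : PySem.List.min? ((a :: t).map w) (fun x => x) with
      | none => exact absurd ((PySem.List.min?_eq_none_iff _ _).mp h) hne2
      | some m => exact ⟨m, rfl⟩
    rw [hm1, hm2]
    have hmem1 : m1 ∈ (a :: t).map w := by
      have := PySem.List.min?_mem hm1
      obtain ⟨b, hb, rfl⟩ := List.mem_map.mp this
      exact List.mem_map_of_mem ((PySem.Set.mem_ofList _ _).mp hb)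
    have hmem2 : m2 ∈ (PySem.Set.ofList (a :: t)).map w := by
      have := PySem.List.min?_mem hm2
      obtain ⟨b, hb, rfl⟩ := List.mem_map.mp this
      exact List.mem_map_of_mem ((PySem.Set.mem_ofList _ _).mpr hb)
    have h12 := PySem.List.min?_isMin hm1 m2 hmem2
    have h21 := PySem.List.min?_isMin hm2 m1 hmem1
    simp only [] at h12 h21
    exact congrArg some (le_antisymm h12 h21)

-- ---- the common value both programs compute ----
def pvW (all : List (List Int)) (i : List Int) : Int :=
  (PySem.List.max? ((PySem.Set.ofList (pvQ all i)).map (fun r => (PySem.List.count (pvQ all i) r : Int)))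
    (fun x => x)).getD 0

-- B-side mirror of pvQ/pvW via feedback_alt (agrees with pvQ/pvW on codes of length ≥ 4)
def pvQalt (all : List (List Int)) (i : List Int) : List (Int × Int) :=
  all.map (fun j => feedback_alt i j 4)

def pvWalt (all : List (List Int)) (i : List Int) : Int :=
  (PySem.List.max? ((PySem.Set.ofList (pvQalt all i)).map (fun r => (PySem.List.count (pvQalt all i) r : Int)))
    (fun x => x)).getD 0

theorem pvQalt_eq (all : List (List Int)) (y : List Int) (hy : 4 ≤ y.length)
    (hlen : ∀ p ∈ all, 4 ≤ p.length) : pvQalt all y = pvQ all y :=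
  List.map_congr_left (fun j hj => (feedback_len_eq y j hy (hlen j hj)).symm)

theorem pvWalt_eq (all : List (List Int)) (y : List Int) (hy : 4 ≤ y.length)
    (hlen : ∀ p ∈ all, 4 ≤ p.length) : pvWalt all y = pvW all y := by
  unfold pvWalt pvW
  rw [pvQalt_eq all y hy hlen]

theorem pvCounts_alt (all : List (List Int)) (g : List Int) :
    all.foldl (fun d code => d.modify (feedback_alt g code 4) 0 (· + 1)) PySem.Dict.empty =
      PySem.Dict.counter (pvQalt all g) := by
  rw [PySem.Dict.counter_eq_foldl, pvQalt, List.foldl_map]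

def pvStep {α : Type} (w : α → Int) (best : Option (α × Int)) (x : α) : Option (α × Int) :=
  match best with
  | none => some (x, w x)
  | some (bg, bw) => if w x < bw then some (x, w x) else some (bg, bw)

theorem pvStep_fold {α : Type} (w : α → Int) :
    ∀ (l : List α) (bg : α),
    l.foldl (pvStep w) (some (bg, w bg)) = some (pvRunmin w bg l, w (pvRunmin w bg l)) := by
  intro l
  induction l with
  | nil => intro bg; rfl
  | cons y t ih =>
    intro bg
    simp only [List.foldl_cons]
    by_cases h : w y < w bg
    · rw [show pvStep w (some (bg, w bg)) y = some (y, w y) by simp [pvStep, h]]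
      rw [ih y, show pvRunmin w bg (y :: t) = pvRunmin w y t by simp [pvRunmin, h]]
    · rw [show pvStep w (some (bg, w bg)) y = some (bg, w bg) by simp [pvStep, h]]
      rw [ih bg, show pvRunmin w bg (y :: t) = pvRunmin w bg t by simp [pvRunmin, h]]

theorem pvValues_counter (q : List (Int × Int)) :
    (PySem.Dict.counter q).values = (PySem.Set.ofList q).map (fun r => (PySem.List.count q r : Int)) := by
  unfold PySem.Dict.values
  rw [PySem.Dict.items_counter, List.map_map]
  exact List.map_congr_left (fun r _ => by simp [PySem.List.count_eq])

-- A's pipeline, named stage by stage (defeq to the port's lets)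
def pvWd (all : List (List Int)) : PySem.Dict String (List (Int × Int)) :=
  all.foldl (pvStepA all) PySem.Dict.empty

def pvEntryOf (wd : PySem.Dict String (List (Int × Int))) (key : String) :
    String × (Int × Int) × Int :=
  let q := wd.getD key []
  let unilist := q.foldl (fun u r => if u.contains r then u else u ++ [r]) []
  let countlist := unilist.foldl (fun c r => c ++ [(PySem.List.count q r : Int)]) []
  let highest := (PySem.List.max? countlist (fun x => x)).getD 0
  (key, (PySem.List.pyGet? unilist (((PySem.List.index? countlist highest).getD 0 : Nat) : Int)).getD (0, 0), highest)

def pvHigh0 (all : List (List Int)) : List (String × (Int × Int) × Int) :=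
  (pvWd all).keys.foldl (fun acc key => acc ++ [pvEntryOf (pvWd all) key]) []

def pvCount (all : List (List Int)) : List Int :=
  (pvHigh0 all).foldl (fun c i => c ++ [i.2.2]) []

def pvLow (all : List (List Int)) : Int :=
  (PySem.List.min? (pvCount all) (fun x => x)).getD 0

def pvOpt (all : List (List Int)) : List (String × (Int × Int) × Int) :=
  (pvHigh0 all).foldl (fun o i => if i.2.2 ≤ pvLow all then o ++ [i] else o) []

def pvEntry (all : List (List Int)) (i : List Int) : String × (Int × Int) × Int :=
  pvEntryOf (pvWd all) (pyReprIntList i)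

theorem pvA_unfold (all : List (List Int)) :
    worst_case_algorithm all =
      match PySem.List.pyGet? (pvOpt all) 0 with
      | some o => parseIntList o.1
      | none => [] := rfl

theorem pvKeys_wd (all : List (List Int)) :
    (pvWd all).keys = (PySem.Set.ofList all).map pyReprIntList := by
  unfold pvWd
  rw [pvBuild_keys all all PySem.Dict.empty]
  rw [show (PySem.Dict.empty : PySem.Dict String (List (Int × Int))).keys = ([] : List String) from rfl]
  rw [← PySem.Set.update_map_eq_foldl_add all pyReprIntList ([] : List String)]
  rw [show PySem.Set.update ([] : List String) (all.map pyReprIntList)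
      = PySem.Set.ofList (all.map pyReprIntList) from PySem.Set.update_empty _]
  exact pvOfList_map_inj pyReprIntList pvRepr_inj all

theorem pvEntry_getD (all : List (List Int)) (i : List Int) (hi : i ∈ all) :
    (pvWd all).getD (pyReprIntList i) [] = pvQ all i :=
  pvBuild_getD_mem all i all PySem.Dict.empty hi

theorem pvUni_eq (q : List (Int × Int)) :
    q.foldl (fun u r => if u.contains r then u else u ++ [r]) [] = PySem.Set.ofList q := by
  have hf : (fun (u : List (Int × Int)) r => if u.contains r then u else u ++ [r]) = PySem.Set.add := by
    funext u r
    rw [PySem.Set.add, PySem.Set.contains_eq_listContains]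
  rw [hf]
  rfl

theorem pvEntry_snd (all : List (List Int)) (i : List Int) (hi : i ∈ all) :
    (pvEntry all i).2.2 = pvW all i := by
  unfold pvEntry pvEntryOf pvW
  simp only [pvEntry_getD all i hi, pvUni_eq, PySem.List.foldl_append_singleton_eq_map,
    List.nil_append]

theorem pvHigh0_eq (all : List (List Int)) :
    pvHigh0 all = (PySem.Set.ofList all).map (pvEntry all) := by
  unfold pvHigh0
  rw [PySem.List.foldl_append_singleton_eq_map (pvEntryOf (pvWd all)) (pvWd all).keys []]
  rw [List.nil_append, pvKeys_wd, List.map_map]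
  rfl

theorem pvCount_eq (all : List (List Int)) :
    pvCount all = (PySem.Set.ofList all).map (fun i => (pvEntry all i).2.2) := by
  unfold pvCount
  rw [pvHigh0_eq, PySem.List.foldl_append_singleton_eq_map, List.nil_append, List.map_map]
  rfl

theorem pvCount_eq' (all : List (List Int)) :
    pvCount all = (PySem.Set.ofList all).map (pvW all) := by
  rw [pvCount_eq]
  exact List.map_congr_left (fun i hi => pvEntry_snd all i ((PySem.Set.mem_ofList _ _).mp hi))

theorem pvLow_eq (all : List (List Int)) (x : List Int) (xs : List (List Int)) (h : all = x :: xs) :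
    pvLow all = (xs.map (pvW all)).foldl min (pvW all x) := by
  unfold pvLow
  rw [pvCount_eq', pvMin_ofList, h, List.map_cons, PySem.List.min?_id_cons]
  rfl

theorem pvOpt_eq (all : List (List Int)) :
    pvOpt all = (pvHigh0 all).filter (fun e => decide (e.2.2 ≤ pvLow all)) := by
  unfold pvOpt
  have hfun : (fun (o : List (String × (Int × Int) × Int)) i =>
      if i.2.2 ≤ pvLow all then o ++ [i] else o) =
      (fun acc i => if (fun (e : String × (Int × Int) × Int) => decide (e.2.2 ≤ pvLow all)) i = true
        then acc ++ [(fun (e : String × (Int × Int) × Int) => e) i] else acc) := by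
    funext o i
    by_cases hc : i.2.2 ≤ pvLow all <;> simp [hc]
  rw [hfun, PySem.List.foldl_append_if]
  simp [List.map_id']

theorem pvOpt_head (all : List (List Int)) (x : List Int) (xs : List (List Int)) (h : all = x :: xs) :
    (pvOpt all).head? = some (pvEntry all (pvRunmin (pvW all) x xs)) := by
  rw [pvOpt_eq, List.head?_filter, pvHigh0_eq, List.find?_map]
  have hof : PySem.Set.ofList all = all.foldl PySem.Set.add [] := rfl
  rw [hof, pvFind_foldl_add _ all [] (by intro y hy; simp at hy)]
  rw [pvFind_congr _ (fun i => decide (pvW all i ≤ pvLow all)) all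
    (fun a ha => by simp only [Function.comp_apply, pvEntry_snd all a ha])]
  have hpred : (fun i => decide (pvW all i ≤ pvLow all)) =
      (fun i => decide (pvW all i ≤ (xs.map (pvW all)).foldl min (pvW all x))) := by
    rw [pvLow_eq all x xs h]
  rw [hpred, h]
  rw [pvFind_min (pvW (x :: xs)) xs x]
  rfl

theorem pvB_eq (all : List (List Int)) (x : List Int) (xs : List (List Int)) (h : all = x :: xs)
    (hlen : ∀ p ∈ all, 4 ≤ p.length) :
    worst_case_algorithm_alt all = pvRunmin (pvW all) x xs := by
  subst h
  set all := x :: xs with hall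
  unfold worst_case_algorithm_alt
  have hbody : (fun (best : Option (List Int × Int)) (guess : List Int) =>
      let counts : PySem.Dict (Int × Int) Int :=
        all.foldl (fun d code => d.modify (feedback_alt guess code 4) 0 (· + 1)) PySem.Dict.empty
      let worst := (PySem.List.max? counts.values (fun x => x)).getD 0
      match best with
      | none => some (guess, worst)
      | some (bg, bw) => if worst < bw then some (guess, worst) else some (bg, bw)) =
      pvStep (pvWalt all) := by
    funext best guess
    simp only [pvCounts_alt, pvValues_counter]
    cases best with
    | none => rfl
    | some p => rfl
  rw [hbody]
  have h2 : all.foldl (pvStep (pvWalt all)) none = all.foldl (pvStep (pvW all)) none :=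
    PySem.List.foldl_congr_mem all _ _ _ (fun acc y hy => by
      unfold pvStep
      rw [pvWalt_eq all y (hlen y hy) hlen])
  rw [h2, hall, List.foldl_cons,
    show pvStep (pvW all) none x = some (x, pvW all x) from rfl, pvStep_fold]

theorem pvA_eq (all : List (List Int)) (x : List Int) (xs : List (List Int)) (h : all = x :: xs) :
    worst_case_algorithm all = pvRunmin (pvW all) x xs := by
  have hh := pvOpt_head all x xs h
  obtain ⟨o, t, hopt⟩ : ∃ o t, pvOpt all = o :: t := by
    cases hcase : pvOpt all with
    | nil => rw [hcase] at hh; simp at hh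
    | cons a u => exact ⟨a, u, rfl⟩
  rw [hopt] at hh
  simp only [List.head?_cons, Option.some.injEq] at hh
  rw [pvA_unfold, hopt, show PySem.List.pyGet? (o :: t) 0 = some o by simp [PySem.List.pyGet?, PySem.List.pyIdx?], hh]
  show parseIntList (pyReprIntList (pvRunmin (pvW all) x xs)) = pvRunmin (pvW all) x xs
  exact pvParse_repr _

-- ===== VERDICT (by name: the statement is the Claim_ definition above) =====
theorem worst_case_algorithm_spec : Claim_equal_worst_case_algorithm := by
  intro all hdom hpre
  unfold Spec_worst_case_algorithm
  obtain ⟨hne, hlen⟩ := hpre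
  obtain ⟨x, xs, h⟩ : ∃ x xs, all = x :: xs := by
    cases all with
    | nil => exact absurd rfl hne
    | cons a t => exact ⟨a, t, rfl⟩
  rw [pvA_eq all x xs h, pvB_eq all x xs h hlen]
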